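-- pv_equiv track=rewrite | github.com/DanishKhakwani/adventOfCode | 3.py | generateCoordList
-- ===== SOURCE A (Python) =====
-- def generateCoordList(my_list):
--
--     coordinates=[0,0]
--     lst=["0:0"]
--
--     for char in my_list[0]:
--         if char == '^':
--             coordinates[0]+=1
--         elif char == 'v':
--             coordinates[0]-=1
--         elif char == '>':
--             coordinates[1]+=1
--         else:
--             coordinates[1]-=1
--
--         lst.append(str(coordinates[0])+":"+str(coordinates[1]))
--
--     return lst
-- ===== SOURCE B (Python) =====
-- def generateCoordList(my_list):
--     s = my_list[0]
--     out = []
--     for i in range(len(s) + 1):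
--         p = s[:i]
--         up, down, right = p.count('^'), p.count('v'), p.count('>')
--         out.append(str(up - down) + ":" + str(right - (i - up - down - right)))
--     return out
-- ===== Notes on version B (the rewrite author's own statement) =====
-- stated objective: alternative
-- what changed: B drops the running coordinate state entirely: for every prefix length i it computes the coordinate directly from character counts of s[:i] (rows = count('^')-count('v'), cols = count('>') minus all other chars), mapping that closed form over range(len(s)+1), instead of A's single stateful walk.
import Mathlib
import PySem

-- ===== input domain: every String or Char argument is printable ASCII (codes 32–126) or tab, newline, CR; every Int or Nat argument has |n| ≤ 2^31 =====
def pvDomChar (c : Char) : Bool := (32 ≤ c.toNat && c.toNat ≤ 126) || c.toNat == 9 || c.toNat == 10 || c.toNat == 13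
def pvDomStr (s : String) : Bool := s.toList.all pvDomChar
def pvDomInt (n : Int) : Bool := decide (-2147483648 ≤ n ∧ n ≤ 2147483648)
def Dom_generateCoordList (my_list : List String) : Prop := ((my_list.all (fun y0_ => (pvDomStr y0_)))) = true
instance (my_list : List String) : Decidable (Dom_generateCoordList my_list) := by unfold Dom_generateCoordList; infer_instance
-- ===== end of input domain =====

-- B replaces A's running-coordinate loop by a staged, per-index closed form: for each prefix
-- length i it computes the coordinate from character COUNTS of s[:i] (alternative decomposition).
-- Pre_ excludes [] where both raise IndexError.


-- ===== PORT A =====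
def pvStepA (st : (Int × Int) × List String) (char : Char) : (Int × Int) × List String :=
  let coordinates :=
    if char = '^' then (st.1.1 + 1, st.1.2)
    else if char = 'v' then (st.1.1 - 1, st.1.2)
    else if char = '>' then (st.1.1, st.1.2 + 1)
    else (st.1.1, st.1.2 - 1)
  (coordinates, st.2 ++ [PySem.Int.toStr coordinates.1 ++ ":" ++ PySem.Int.toStr coordinates.2])

def generateCoordList (my_list : List String) : List String :=
  match PySem.List.pyGet? my_list 0 with
  | none => []   -- my_list[0] raises IndexError; excluded by Pre_
  | some s => (s.toList.foldl pvStepA ((0, 0), ["0:0"])).2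

-- ===== PORT B =====
-- the loop body of Source B: the entry for prefix length i, computed from counts of s[:i]
-- (str.count of a single-character needle is exactly List.count of that char on toList)
def pvEntry (cs : List Char) (i : Int) : String :=
  let p := PySem.List.slice cs none (some i)
  let up : Int := p.count '^'
  let down : Int := p.count 'v'
  let right : Int := p.count '>'
  PySem.Int.toStr (up - down) ++ ":" ++ PySem.Int.toStr (right - (i - up - down - right))

def generateCoordList_alt (my_list : List String) : List String :=
  match PySem.List.pyGet? my_list 0 with
  | none => []   -- my_list[0] raises IndexError; excluded by Pre_
  | some s =>
    (PySem.List.pyRange 0 ((s.toList.length : Int) + 1) 1).map (pvEntry s.toList)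

-- ===== PRECONDITION & SPEC =====
-- A (and B) raise IndexError on my_list[0] when the list is empty.
def Pre_generateCoordList (my_list : List String) : Prop := my_list ≠ []
instance (my_list : List String) : Decidable (Pre_generateCoordList my_list) := by
  unfold Pre_generateCoordList; infer_instance

def pvWitness_generateCoordList : List String := ["^v>x"]

def Spec_generateCoordList (my_list : List String) (out : List String) : Prop := out = generateCoordList_alt my_list
instance (my_list : List String) (out : List String) : Decidable (Spec_generateCoordList my_list out) := by unfold Spec_generateCoordList; infer_instance

-- ===== CLAIM (what is proved, stated in full; the proofs are below) =====
def Claim_equal_generateCoordList : Prop := ∀ (my_list : List String), Dom_generateCoordList my_list → Pre_generateCoordList my_list → Spec_generateCoordList my_list (generateCoordList my_list)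

-- ===== LEMMAS AND PROOFS =====

-- the coordinate B's closed form assigns to a whole prefix
def pvCoord (p : List Char) : Int × Int :=
  ((p.count '^' : Int) - p.count 'v',
   (p.count '>' : Int) - ((p.length : Int) - p.count '^' - p.count 'v' - p.count '>'))

theorem pvEntry_eq (cs p : List Char) (i : Int) (h0 : 0 ≤ i)
    (hp : PySem.List.slice cs none (some i) = p) (hlen : (p.length : Int) = i) :
    pvEntry cs i = PySem.Int.toStr (pvCoord p).1 ++ ":" ++ PySem.Int.toStr (pvCoord p).2 := by
  subst hlen
  simp only [pvEntry, hp, pvCoord]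

-- one A-step from a closed-form state lands on the closed-form state of the extended prefix
theorem pvStepA_coord (p : List Char) (acc : List String) (c : Char) :
    pvStepA (pvCoord p, acc) c =
      (pvCoord (p ++ [c]),
        acc ++ [PySem.Int.toStr (pvCoord (p ++ [c])).1 ++ ":" ++ PySem.Int.toStr (pvCoord (p ++ [c])).2]) := by
  have key : (if c = '^' then ((pvCoord p).1 + 1, (pvCoord p).2)
      else if c = 'v' then ((pvCoord p).1 - 1, (pvCoord p).2)
      else if c = '>' then ((pvCoord p).1, (pvCoord p).2 + 1)
      else ((pvCoord p).1, (pvCoord p).2 - 1)) = pvCoord (p ++ [c]) := by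
    simp only [pvCoord, List.count_append, List.length_append, List.count_singleton,
      List.length_singleton]
    by_cases h1 : c = '^'
    · subst h1; simp [Prod.ext_iff]; omega
    · by_cases h2 : c = 'v'
      · subst h2; simp [Prod.ext_iff, h1]; omega
      · by_cases h3 : c = '>'
        · subst h3; simp [Prod.ext_iff, h1, h2]; omega
        · simp [Prod.ext_iff, beq_iff_eq, h1, h2, h3]; omega
  simp only [pvStepA, key]

-- A's whole fold is B's map over prefix lengths
theorem pvLoop (cs : List Char) :
    cs.foldl pvStepA ((0, 0), ["0:0"]) =
      (pvCoord cs, (PySem.List.pyRange 0 ((cs.length : Int) + 1) 1).map (pvEntry cs)) := by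
  induction cs using List.reverseRecOn with
  | nil => decide
  | append_singleton cs c ih =>
    rw [List.foldl_append, ih, List.foldl_cons, List.foldl_nil, pvStepA_coord]
    refine congrArg _ ?_
    have hsplit : PySem.List.pyRange 0 (((cs ++ [c]).length : Int) + 1) 1
        = PySem.List.pyRange 0 ((cs.length : Int) + 1) 1 ++ [(cs.length : Int) + 1] := by
      have := PySem.List.pyRange_one_succ_right (a := 0) (b := (cs.length : Int) + 1)
        (by positivity)
      simpa [List.length_append] using this
    rw [hsplit, List.map_append, List.map_singleton]
    refine congrArg₂ _ ?_ ?_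
    · refine List.map_congr_left ?_
      intro i hi
      rw [PySem.List.mem_pyRange_one] at hi
      simp only [pvEntry]
      have h1 : PySem.List.slice (cs ++ [c]) none (some i)
          = PySem.List.slice cs none (some i) := by
        rw [PySem.List.slice_to _ hi.1, PySem.List.slice_to _ hi.1,
          List.take_append_of_le_length (by omega)]
      rw [h1]
    · have hfull : ∀ (l : List Char), PySem.List.slice l none (some ((l.length : Int))) = l := by
        intro l
        rw [PySem.List.slice_to _ (by positivity)]
        simp
      rw [pvEntry_eq (cs ++ [c]) (cs ++ [c]) _ (by positivity) ?_ ?_]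
      · simpa [List.length_append] using hfull (cs ++ [c])
      · simp [List.length_append]

-- ===== VERDICT (by name: the statement is the Claim_ definition above) =====
theorem generateCoordList_spec : Claim_equal_generateCoordList := by
  intro my_list _ hpre
  unfold Spec_generateCoordList
  cases my_list with
  | nil => exact absurd rfl hpre
  | cons s t =>
    simp only [generateCoordList, generateCoordList_alt, PySem.List.pyGet?_zero_cons, pvLoop]
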